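-- pv_equiv track=rewrite | github.com/k3rbot/Malle | Malle_2_PITON_RAVILY_BARAUD-MYSKO.py | ollivander
-- ===== SOURCE A (Python) =====
-- def ollivander(monnaie:list) -> list:
--     """
--     Fonction permettant de savoir comment rendre une somme
--     de noises, mornilles et gallions avec le moins de
--     pièces possible.
--
--
--     Entrée: Montant à rendre
--     Sortie: L'équivalent en gallions, mornilles et noises
--             rendus avec le moins de pièces possibles.
--     """
--     for i in range(3):
--         if type(monnaie[i]) == str:
--             monnaie[i] = int(monnaie[i])
--
--     monnaie_rendue = [0, 0, 0]
--     monnaie_rendue[1] = monnaie[2] // 29 + monnaie[1]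
--     monnaie_rendue[2] = monnaie[2] % 29
--     monnaie_rendue[0] = monnaie_rendue[1] // 17 + monnaie[0]
--     monnaie_rendue[1] %= 17
--
--     return monnaie_rendue
-- ===== SOURCE B (Python) =====
-- def ollivander(monnaie: list) -> list:
--     """Same conversion via one aggregated total split top-down with divmod."""
--     for i in range(3):
--         if type(monnaie[i]) == str:
--             monnaie[i] = int(monnaie[i])
--
--     total = monnaie[0] * 493 + monnaie[1] * 29 + monnaie[2]
--     gallions, rem = divmod(total, 493)
--     mornilles, noises = divmod(rem, 29)
--     return [gallions, mornilles, noises]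
-- ===== Notes on version B (the rewrite author's own statement) =====
-- stated objective: alternative
-- what changed: B aggregates the three amounts into a single total of noises and splits it top-down with two divmods, instead of A's bottom-up chained per-level carries.
import Mathlib
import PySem

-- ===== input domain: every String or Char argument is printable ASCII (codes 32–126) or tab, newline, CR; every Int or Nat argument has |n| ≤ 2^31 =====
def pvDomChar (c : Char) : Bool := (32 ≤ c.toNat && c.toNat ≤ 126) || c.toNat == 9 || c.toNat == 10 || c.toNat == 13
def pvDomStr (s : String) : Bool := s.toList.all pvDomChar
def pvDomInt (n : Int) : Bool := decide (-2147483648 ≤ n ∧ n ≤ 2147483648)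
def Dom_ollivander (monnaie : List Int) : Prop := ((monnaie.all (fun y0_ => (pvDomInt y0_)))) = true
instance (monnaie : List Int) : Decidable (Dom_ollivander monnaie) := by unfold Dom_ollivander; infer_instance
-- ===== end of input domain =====

-- B splits one aggregated total of noises top-down with divmod instead of A's
-- bottom-up per-level carries (objective: alternative decomposition, same cost).
-- Both Pythons also convert str entries of the list to int in place; on the Int
-- domain modelled here that side effect never happens, the claim is about the
-- return value.

-- ===== PORT A =====
-- Python indexing monnaie[0..2] raises IndexError on lists shorter than 3;
-- Pre_ excludes those, so the catch-all branch is never reached under Pre_.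
def ollivander (monnaie : List Int) : List Int :=
  match monnaie with
  | m0 :: m1 :: m2 :: _ =>
    -- monnaie_rendue[1] = monnaie[2] // 29 + monnaie[1]
    let r1 := PySem.Int.floordiv m2 29 + m1
    -- monnaie_rendue[2] = monnaie[2] % 29
    let r2 := PySem.Int.mod m2 29
    -- monnaie_rendue[0] = monnaie_rendue[1] // 17 + monnaie[0]
    let r0 := PySem.Int.floordiv r1 17 + m0
    -- monnaie_rendue[1] %= 17
    [r0, PySem.Int.mod r1 17, r2]
  | _ => []

-- ===== PORT B =====
def ollivander_alt (monnaie : List Int) : List Int :=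
  match PySem.List.pyGet? monnaie 0, PySem.List.pyGet? monnaie 1, PySem.List.pyGet? monnaie 2 with
  | some m0, some m1, some m2 =>
    let total := m0 * 493 + m1 * 29 + m2
    let gallions := PySem.Int.floordiv total 493
    let rem := PySem.Int.mod total 493
    let mornilles := PySem.Int.floordiv rem 29
    let noises := PySem.Int.mod rem 29
    [gallions, mornilles, noises]
  | _, _, _ => []

-- ===== PRECONDITION & SPEC =====
-- Pre_ excludes exactly the lists of fewer than 3 elements, on which A raises IndexError.
def Pre_ollivander (monnaie : List Int) : Prop := 3 ≤ monnaie.length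
instance (monnaie : List Int) : Decidable (Pre_ollivander monnaie) := by unfold Pre_ollivander; infer_instance
def pvWitness_ollivander : List Int := [5, 40, 100]

def Spec_ollivander (monnaie : List Int) (out : List Int) : Prop := out = ollivander_alt monnaie
instance (monnaie : List Int) (out : List Int) : Decidable (Spec_ollivander monnaie out) := by unfold Spec_ollivander; infer_instance

-- ===== CLAIM (what is proved, stated in full; the proofs are below) =====
def Claim_equal_ollivander : Prop := ∀ (monnaie : List Int), Dom_ollivander monnaie → Pre_ollivander monnaie → Spec_ollivander monnaie (ollivander monnaie)

-- ===== LEMMAS AND PROOFS =====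

-- ===== VERDICT (by name: the statement is the Claim_ definition above) =====
theorem ollivander_spec : Claim_equal_ollivander := by
  intro monnaie _ hpre
  match monnaie with
  | m0 :: m1 :: m2 :: rest =>
    show _ = ollivander_alt _
    unfold ollivander ollivander_alt
    rw [show (0:Int) = ((0:Nat):Int) from rfl, show (1:Int) = ((1:Nat):Int) from rfl,
        show (2:Int) = ((2:Nat):Int) from rfl]
    simp only [PySem.List.pyGet?_natCast, List.getElem?_cons_zero, List.getElem?_cons_succ]
    simp only [PySem.Int.floordiv_eq_ediv_of_pos (a := m2) (by norm_num : (0:Int) < 29),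
      PySem.Int.mod_eq_emod_of_pos (a := m2) (by norm_num : (0:Int) < 29)]
    rw [PySem.Int.floordiv_eq_ediv_of_pos (by norm_num : (0:Int) < 17),
        PySem.Int.mod_eq_emod_of_pos (by norm_num : (0:Int) < 17),
        PySem.Int.floordiv_eq_ediv_of_pos (by norm_num : (0:Int) < 493),
        PySem.Int.mod_eq_emod_of_pos (by norm_num : (0:Int) < 493),
        PySem.Int.floordiv_eq_ediv_of_pos (by norm_num : (0:Int) < 29),
        PySem.Int.mod_eq_emod_of_pos (by norm_num : (0:Int) < 29)]
    simp only [List.cons.injEq, and_true]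
    refine ⟨?_, ?_, ?_⟩ <;> omega
  | [] => simp [Pre_ollivander] at hpre
  | [_] => simp [Pre_ollivander] at hpre
  | [_, _] => simp [Pre_ollivander] at hpre
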